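-- pv_equiv track=rewrite | github.com/data-integration-toolkit/ditk | extraction/named_entity/transferlearning/experiment.py | format_for_eval
-- ===== SOURCE A (Python) =====
-- def format_for_eval(data):
--     converted_data = []
--     sent = []
--     for token in data:
--         if len(token) != 0:
--             zz = tuple([token[2]])
--             sent.append((zz, token[3]))
--         else:
--             converted_data.append(sent)
--             sent = []
--
--     return converted_data
-- ===== SOURCE B (Python) =====
-- def format_for_eval(data):
--     # Two-phase: format every nonempty token up front into a flat pairs list and
--     # collect the indices of the empty delimiter tokens; then cut the pairs list
--     # into the segments lying between consecutive delimiters.  Pairs after the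
--     # last delimiter are deliberately never emitted, like A's trailing sentence.
--     pairs = [((t[2],), t[3]) for t in data if len(t) != 0]
--     boundaries = [i for i, t in enumerate(data) if len(t) == 0]
--     converted_data = []
--     start = 0
--     p = 0
--     for e in boundaries:
--         n = e - start
--         converted_data.append(pairs[p:p + n])
--         p += n
--         start = e + 1
--     return converted_data
-- ===== Notes on version B (the rewrite author's own statement) =====
-- stated objective: alternative
-- what changed: B first formats all nonempty tokens into a flat pairs list and collects the empty-delimiter indices, then cuts the pairs list into slices between consecutive delimiter indices with a running pointer, instead of A's single token-by-token pass with a running sentence accumulator.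
import Mathlib
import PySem

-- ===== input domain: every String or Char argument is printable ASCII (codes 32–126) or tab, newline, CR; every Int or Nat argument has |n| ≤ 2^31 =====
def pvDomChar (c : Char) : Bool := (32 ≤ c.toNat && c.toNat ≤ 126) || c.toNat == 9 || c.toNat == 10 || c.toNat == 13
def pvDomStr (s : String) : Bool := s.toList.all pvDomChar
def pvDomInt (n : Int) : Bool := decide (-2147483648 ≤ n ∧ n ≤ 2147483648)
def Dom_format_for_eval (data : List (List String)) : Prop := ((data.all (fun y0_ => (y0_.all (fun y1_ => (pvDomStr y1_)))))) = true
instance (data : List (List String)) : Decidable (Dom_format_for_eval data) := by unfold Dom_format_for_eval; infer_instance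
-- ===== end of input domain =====

-- B formats all nonempty tokens up front into a flat pairs list, collects the delimiter indices,
-- and then cuts the pairs list into the segments between consecutive delimiters — an index/slice
-- decomposition instead of A's single pass with a running sentence accumulator. Same cost.

-- ===== PORT A =====
-- A's loop: state (converted_data, sent); token[2]/token[3] are pyGetD, exact under Pre_.
def format_for_eval (data : List (List String)) : List (List (List String × String)) :=
  (data.foldl
    (fun (st : List (List (List String × String)) × List (List String × String)) token =>
      if token.length ≠ 0 then
        (st.1, st.2 ++ [([PySem.List.pyGetD token 2 ""], PySem.List.pyGetD token 3 "")])
      else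
        (st.1 ++ [st.2], []))
    ([], [])).1

-- ===== PORT B =====
-- Source B: pairs list (formatted nonempty tokens), boundary-index list via enumerate, then a fold
-- over the boundaries with state (converted_data, start, p) slicing pairs[p : p + (e - start)].
def format_for_eval_alt (data : List (List String)) : List (List (List String × String)) :=
  let pairs := (data.filter (fun t => !(PySem.List.len t == 0))).map
    (fun t => ([PySem.List.pyGetD t 2 ""], PySem.List.pyGetD t 3 ""))
  let boundaries := ((PySem.List.enumerate data 0).filter (fun p => PySem.List.len p.2 == 0)).map (·.1)
  (boundaries.foldl
    (fun (st : List (List (List String × String)) × Int × Int) e =>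
      (st.1 ++ [PySem.List.slice pairs (some st.2.2) (some (st.2.2 + (e - st.2.1)))],
       e + 1, st.2.2 + (e - st.2.1)))
    ([], 0, 0)).1

-- ===== PRECONDITION & SPEC =====
-- Pre_ excludes exactly the inputs on which Python A (and Python B alike) raises IndexError:
-- a nonempty token with fewer than 4 fields.
def Pre_format_for_eval (data : List (List String)) : Prop := ∀ t ∈ data, t = [] ∨ 4 ≤ t.length
instance (data : List (List String)) : Decidable (Pre_format_for_eval data) := by unfold Pre_format_for_eval; infer_instance
def pvWitness_format_for_eval : List (List String) := [["w1", "p1", "a", "b"], [], ["w2", "p2", "c", "d"]]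

def Spec_format_for_eval (data : List (List String)) (out : List (List (List String × String))) : Prop := out = format_for_eval_alt data
instance (data : List (List String)) (out : List (List (List String × String))) : Decidable (Spec_format_for_eval data out) := by unfold Spec_format_for_eval; infer_instance

-- ===== CLAIM (what is proved, stated in full; the proofs are below) =====
def Claim_equal_format_for_eval : Prop := ∀ (data : List (List String)), Dom_format_for_eval data → Pre_format_for_eval data → Spec_format_for_eval data (format_for_eval data)

-- ===== LEMMAS AND PROOFS =====

-- the token-formatting map both programs apply
def pvF (t : List String) : List String × String :=
  ([PySem.List.pyGetD t 2 ""], PySem.List.pyGetD t 3 "")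

-- reference recursion for A's loop with pending sentence s
def pvGA : List (List String) → List (List String × String) → List (List (List String × String))
  | [], _ => []
  | t :: ts, s => if t.length = 0 then s :: pvGA ts [] else pvGA ts (s ++ [pvF t])

-- Nat-indexed positions of the empty tokens
def pvEmps : List (List String) → List Nat
  | [] => []
  | t :: ts => if t.length = 0 then 0 :: (pvEmps ts).map (· + 1) else (pvEmps ts).map (· + 1)

-- B's flat list of formatted nonempty tokens
def pvPairs (xs : List (List String)) : List (List String × String) :=
  (xs.filter (fun t => !(PySem.List.len t == 0))).map pvF

-- Nat-level form of B's fold over the boundary list (state: acc, start, pairs pointer p)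
def pvSegs (pairs : List (List String × String)) (es : List Nat)
    (acc : List (List (List String × String))) (start p : Nat) : List (List (List String × String)) :=
  (es.foldl (fun st e => (st.1 ++ [(pairs.drop st.2.2).take (e - st.2.1)], e + 1, st.2.2 + (e - st.2.1)))
    (acc, start, p)).1

lemma pvSegs_nil (pairs : List (List String × String)) (acc : List (List (List String × String)))
    (start p : Nat) : pvSegs pairs [] acc start p = acc := rfl

lemma pvSegs_cons (pairs : List (List String × String)) (e : Nat) (es : List Nat)
    (acc : List (List (List String × String))) (start p : Nat) :
    pvSegs pairs (e :: es) acc start p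
      = pvSegs pairs es (acc ++ [(pairs.drop p).take (e - start)]) (e + 1) (p + (e - start)) := rfl

lemma pvPairs_cons_empty (ts : List (List String)) : pvPairs ([] :: ts) = pvPairs ts := rfl

lemma pvPairs_cons_ne (t : List String) (ts : List (List String)) (h : t.length ≠ 0) :
    pvPairs (t :: ts) = pvF t :: pvPairs ts := by
  simp [pvPairs, List.filter_cons, PySem.List.len_eq, h]

lemma pvGA_foldl (data : List (List String)) :
    ∀ (c : List (List (List String × String))) (s : List (List String × String)),
    (data.foldl
      (fun (st : List (List (List String × String)) × List (List String × String)) token =>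
        if token.length ≠ 0 then (st.1, st.2 ++ [pvF token]) else (st.1 ++ [st.2], []))
      (c, s)).1 = c ++ pvGA data s := by
  induction data with
  | nil => intro c s; simp [pvGA]
  | cons t ts ih =>
    intro c s
    rw [List.foldl_cons]
    show (List.foldl _ (if t.length ≠ 0 then (c, s ++ [pvF t]) else (c ++ [s], [])) ts).1 = _
    by_cases h : t.length = 0
    · rw [if_neg (not_not_intro h), ih,
          show pvGA (t :: ts) s = s :: pvGA ts [] from by simp [pvGA, h]]
      simp
    · rw [if_pos h, ih,
          show pvGA (t :: ts) s = pvGA ts (s ++ [pvF t]) from by simp [pvGA, h]]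

lemma pvEnum_filter (xs : List (List String)) :
    ∀ (s : Nat),
    ((PySem.List.enumerate xs (s : Int)).filter (fun p => PySem.List.len p.2 == 0)).map (·.1)
      = (pvEmps xs).map (fun k => ((s + k : Nat) : Int)) := by
  induction xs with
  | nil => intro s; simp [PySem.List.enumerate_nil, pvEmps]
  | cons t ts ih =>
    intro s
    have h1 : ((s : Int) + 1) = ((s + 1 : Nat) : Int) := by omega
    rw [PySem.List.enumerate_cons, List.filter_cons, h1]
    by_cases ht : t = []
    · subst ht
      rw [if_pos (by rfl), List.map_cons, ih (s + 1),
          show pvEmps ([] :: ts) = 0 :: (pvEmps ts).map (· + 1) from by simp [pvEmps],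
          List.map_cons, List.map_map]
      refine congrArg₂ _ (by push_cast; ring) ?_
      apply List.map_congr_left; intro k _; simp [Function.comp]; push_cast; ring
    · have h : t.length ≠ 0 := by simpa using ht
      rw [if_neg (by simp [PySem.List.len_eq, List.length_eq_zero_iff, ht]), ih (s + 1),
          show pvEmps (t :: ts) = (pvEmps ts).map (· + 1) from by simp [pvEmps, h],
          List.map_map]
      apply List.map_congr_left; intro k _; simp [Function.comp]; push_cast; ring

-- the boundary positions are strictly increasing and lie above any lower bound d ≤ c
lemma pvEmps_chain (xs : List (List String)) :
    ∀ (c d : Nat), d ≤ c → List.Chain (· < ·) d ((pvEmps xs).map (· + (c + 1))) := by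
  induction xs with
  | nil => intro c d _; simp only [pvEmps, List.map_nil]; exact List.Chain.nil
  | cons t ts ih =>
    intro c d hdc
    by_cases h : t.length = 0
    · rw [show pvEmps (t :: ts) = 0 :: (pvEmps ts).map (· + 1) from by simp [pvEmps, h],
          List.map_cons, List.map_map,
          show (pvEmps ts).map ((· + (c + 1)) ∘ (· + 1)) = (pvEmps ts).map (· + ((c + 1) + 1)) from
            List.map_congr_left (fun k _ => by simp [Function.comp]; omega),
          show (0 : Nat) + (c + 1) = c + 1 from by omega]
      exact List.Chain.cons (by omega) (ih (c + 1) (c + 1) (le_refl _))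
    · rw [show pvEmps (t :: ts) = (pvEmps ts).map (· + 1) from by simp [pvEmps, h], List.map_map,
          show (pvEmps ts).map ((· + (c + 1)) ∘ (· + 1)) = (pvEmps ts).map (· + ((c + 1) + 1)) from
            List.map_congr_left (fun k _ => by simp [Function.comp]; omega)]
      exact ih (c + 1) d (by omega)

-- B's Int-state fold equals the Nat-level pvSegs (boundaries ahead of start, strictly increasing)
lemma pvSegs_int (pairs : List (List String × String)) (es : List Nat) :
    ∀ (acc : List (List (List String × String))) (st p : Nat),
    List.Chain (· < ·) st (es.map (· + 1)) →
    ((es.map (fun (k : Nat) => (k : Int))).foldl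
      (fun (s : List (List (List String × String)) × Int × Int) e =>
        (s.1 ++ [PySem.List.slice pairs (some s.2.2) (some (s.2.2 + (e - s.2.1)))],
         e + 1, s.2.2 + (e - s.2.1)))
      (acc, (st : Int), (p : Int))).1 = pvSegs pairs es acc st p := by
  induction es with
  | nil => intro acc st p _; rfl
  | cons e es ih =>
    intro acc st p hch
    rw [List.map_cons] at hch
    have hse : st ≤ e := by cases hch; omega
    have htl : List.Chain (· < ·) (e + 1) (es.map (· + 1)) := by cases hch; assumption
    rw [List.map_cons, List.foldl_cons]
    show ((List.map (fun (k : Nat) => (k : Int)) es).foldl _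
      (acc ++ [PySem.List.slice pairs (some (p : Int)) (some ((p : Int) + ((e : Int) - (st : Int))))],
       (e : Int) + 1, (p : Int) + ((e : Int) - (st : Int)))).1 = _
    rw [show (p : Int) + ((e : Int) - (st : Int)) = ((p + (e - st) : Nat) : Int) from by omega,
        show (e : Int) + 1 = ((e + 1 : Nat) : Int) from by omega,
        PySem.List.slice_natCast, Nat.add_sub_cancel_left, ih _ _ _ htl, pvSegs_cons]

-- accumulator extraction for pvSegs
lemma pvSegs_acc (pairs : List (List String × String)) (es : List Nat) :
    ∀ (acc : List (List (List String × String))) (st p : Nat),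
    pvSegs pairs es acc st p = acc ++ pvSegs pairs es [] st p := by
  induction es with
  | nil => intro acc st p; rw [pvSegs_nil, pvSegs_nil]; simp
  | cons e es ih =>
    intro acc st p
    rw [pvSegs_cons, pvSegs_cons, ih, ih ([] ++ _)]
    simp

-- main induction: B's segments over q ++ data, with start inside q and the pairs pointer p
-- aligned with start, equal A's recursion with pending sentence (q.drop start).map pvF
lemma pvMain (data : List (List String)) :
    ∀ (q : List (List String)) (st p : Nat), st ≤ q.length →
    (pvPairs (q ++ data)).drop p = (q.drop st).map pvF ++ pvPairs data →
    pvSegs (pvPairs (q ++ data)) ((pvEmps data).map (· + q.length)) [] st p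
      = pvGA data ((q.drop st).map pvF) := by
  induction data with
  | nil => intro q st p _ _; simp [pvEmps, pvSegs_nil, pvGA]
  | cons t ts ih =>
    intro q st p hst hp
    by_cases h : t.length = 0
    · have ht : t = [] := List.eq_nil_of_length_eq_zero h
      subst ht
      rw [show pvEmps ([] :: ts) = 0 :: (pvEmps ts).map (· + 1) from by simp [pvEmps],
          show pvGA ([] :: ts) ((q.drop st).map pvF) = (q.drop st).map pvF :: pvGA ts [] from by
            simp [pvGA],
          List.map_cons, List.map_map, pvSegs_cons]
      have hlen : ((q.drop st).map pvF).length = q.length - st := by simp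
      have hseg : ((pvPairs (q ++ [] :: ts)).drop p).take (0 + q.length - st)
          = (q.drop st).map pvF := by
        rw [hp, show 0 + q.length - st = ((q.drop st).map pvF).length from by rw [hlen]; omega,
            List.take_left]
      have hp' : (pvPairs (q ++ [] :: ts)).drop (p + (0 + q.length - st)) = pvPairs ts := by
        rw [show p + (0 + q.length - st) = p + (q.length - st) from by omega, ← List.drop_drop, hp,
            show q.length - st = ((q.drop st).map pvF).length from hlen.symm,
            List.drop_left, pvPairs_cons_empty]
      have hdata : q ++ [] :: ts = (q ++ [[]]) ++ ts := by simp
      rw [hseg, pvSegs_acc,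
          show (pvEmps ts).map ((· + q.length) ∘ (· + 1)) = (pvEmps ts).map (· + (q ++ [[]]).length)
            from List.map_congr_left (fun k _ => by
              simp only [Function.comp_apply, List.length_append, List.length_cons,
                List.length_nil]; omega),
          show 0 + q.length + 1 = (q ++ [[]]).length from by simp, hdata]
      have H := ih (q ++ [[]]) ((q ++ [[]]).length) (p + (0 + q.length - st)) (le_refl _)
        (by rw [← hdata, hp']; simp [List.drop_length])
      simp only [List.drop_length, List.map_nil] at H
      rw [H]
      simp
    · rw [show pvEmps (t :: ts) = (pvEmps ts).map (· + 1) from by simp [pvEmps, h],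
          show pvGA (t :: ts) ((q.drop st).map pvF)
              = pvGA ts ((q.drop st).map pvF ++ [pvF t]) from by simp [pvGA, h],
          List.map_map]
      have hdata : q ++ t :: ts = (q ++ [t]) ++ ts := by simp
      have H := ih (q ++ [t]) st p (by simp; omega)
        (by rw [← hdata, hp, pvPairs_cons_ne t ts h, List.drop_append_of_le_length hst]; simp)
      rw [show (pvEmps ts).map ((· + q.length) ∘ (· + 1)) = (pvEmps ts).map (· + (q ++ [t]).length)
            from List.map_congr_left (fun k _ => by
              simp only [Function.comp_apply, List.length_append, List.length_cons,
                List.length_nil]; omega),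
          hdata, H]
      congr 1
      rw [List.drop_append_of_le_length hst]
      simp

-- ===== VERDICT (by name: the statement is the Claim_ definition above) =====
theorem format_for_eval_spec : Claim_equal_format_for_eval := by
  intro data _ _
  show format_for_eval data = format_for_eval_alt data
  have h1 : format_for_eval data = pvGA data [] := by
    have hA := pvGA_foldl data [] []
    simp only [pvF] at hA
    unfold format_for_eval
    rw [hA, List.nil_append]
  have h2 : format_for_eval_alt data = pvSegs (pvPairs data) (pvEmps data) [] 0 0 := by
    have hB0 : ((PySem.List.enumerate data 0).filter (fun p => PySem.List.len p.2 == 0)).map (·.1)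
        = (pvEmps data).map (fun (k : Nat) => (k : Int)) := by
      have := pvEnum_filter data 0
      rw [show ((0 : Nat) : Int) = (0 : Int) from rfl] at this
      rw [this]
      apply List.map_congr_left; intro k _; norm_num
    have hch : List.Chain (· < ·) 0 ((pvEmps data).map (· + 1)) := by
      have := pvEmps_chain data 0 0 (le_refl 0)
      simpa using this
    show ((((PySem.List.enumerate data (0 : Int)).filter
        (fun p => PySem.List.len p.2 == 0)).map (·.1)).foldl _ ([], (0 : Int), (0 : Int))).1 = _
    rw [hB0]
    exact pvSegs_int (pvPairs data) (pvEmps data) [] 0 0 hch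
  have hM := pvMain data [] 0 0 (by simp) (by simp [pvPairs])
  simp only [List.nil_append, List.length_nil, Nat.add_zero, List.map_id', List.drop_nil,
    List.map_nil] at hM
  rw [h1, h2, ← hM]
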